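-- pv_equiv track=rewrite | github.com/UKGovernmentBEIS/inspect_ai | src/inspect_ai/_util/json.py | _get_active_container
-- ===== SOURCE A (Python) =====
-- def _get_active_container(
--     path: str, tracked_paths: set[str]
-- ) -> tuple[str | None, str | None]:
--     """Checks if a specific path belongs to a tracked container for json_changes.
--
--     Returns:
--         (container, relative_path_without_slash) e.g., ("/items", "0")
--     """
--     if not tracked_paths:
--         return None, None
--
--     # Find the most specific (longest) matching container to handle nested arrays
--     best_match: str | None = None
--     for container in tracked_paths:
--         if path.startswith(container + "/"):
--             if best_match is None or len(container) > len(best_match):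
--                 best_match = container
--
--     if best_match is not None:
--         # Return container and the path relative to it (stripping the slash)
--         return best_match, path[len(best_match) + 1 :]
--
--     return None, None
-- ===== SOURCE B (Python) =====
-- def _get_active_container(path, tracked_paths):
--     # Scan slash positions from the end: the first hit is the longest container.
--     for i in range(len(path) - 1, -1, -1):
--         if path[i] == "/" and path[:i] in tracked_paths:
--             return path[:i], path[i + 1:]
--     return None, None
-- ===== Notes on version B (the rewrite author's own statement) =====
-- stated objective: alternative
-- what changed: Instead of testing every tracked container against the path, B scans the path's slash positions from the end and looks up each ancestor prefix in the tracked set, returning at the first (longest) hit.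
import Mathlib
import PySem

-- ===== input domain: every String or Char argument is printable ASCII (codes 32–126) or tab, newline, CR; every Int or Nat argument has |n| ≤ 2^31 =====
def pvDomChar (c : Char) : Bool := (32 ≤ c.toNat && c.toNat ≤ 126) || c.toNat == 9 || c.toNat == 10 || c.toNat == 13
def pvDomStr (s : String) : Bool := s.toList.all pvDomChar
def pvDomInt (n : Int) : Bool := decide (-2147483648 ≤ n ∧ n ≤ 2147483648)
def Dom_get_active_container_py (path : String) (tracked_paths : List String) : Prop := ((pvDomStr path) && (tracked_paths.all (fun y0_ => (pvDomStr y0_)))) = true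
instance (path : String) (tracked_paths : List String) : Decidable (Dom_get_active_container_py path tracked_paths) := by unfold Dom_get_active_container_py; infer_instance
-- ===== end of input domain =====

-- B replaces A's scan over every tracked container by a scan over the path's
-- slash positions (longest prefix first) with a set lookup of each ancestor prefix.

-- ===== PORT A =====
-- literal port of _get_active_container: fold over tracked_paths keeping the
-- longest container c with path.startswith(c + "/"), then strip it from path.
def get_active_container_py (path : String) (tracked_paths : List String) : Option String × Option String :=
  if tracked_paths = [] then (none, none)
  else
    let best := tracked_paths.foldl
      (fun (best : Option String) (container : String) =>
        if PySem.Chars.startswith path.toList (container.toList ++ ['/']) then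
          match best with
          | none => some container
          | some b => if b.toList.length < container.toList.length then some container else some b
        else best) none
    match best with
    | some b =>
        (some b,
         some (String.ofList (PySem.List.slice path.toList (some ((b.toList.length : Int) + 1)) none)))
    | none => (none, none)

-- ===== PORT B =====
-- loop of Source B: for i in range(len(path)-1, -1, -1): if path[i] == "/" and path[:i] in tracked_paths: return path[:i], path[i+1:]
-- (altLoop cs tracked (i+1) is the loop iteration with index i)
def altLoop (cs : List Char) (tracked : List String) : Nat → Option String × Option String
  | 0 => (none, none)
  | (i+1) =>
    if cs[i]? = some '/' ∧ String.ofList (cs.take i) ∈ tracked then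
      (some (String.ofList (cs.take i)), some (String.ofList (cs.drop (i+1))))
    else altLoop cs tracked i

def get_active_container_py_alt (path : String) (tracked_paths : List String) : Option String × Option String :=
  altLoop path.toList tracked_paths path.toList.length

-- ===== PRECONDITION & SPEC =====
def Spec_get_active_container_py (path : String) (tracked_paths : List String) (out : Option String × Option String) : Prop := out = get_active_container_py_alt path tracked_paths
instance (path : String) (tracked_paths : List String) (out : Option String × Option String) : Decidable (Spec_get_active_container_py path tracked_paths out) := by unfold Spec_get_active_container_py; infer_instance

-- ===== CLAIM (what is proved, stated in full; the proofs are below) =====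
def Claim_equal_get_active_container_py : Prop := ∀ (path : String) (tracked_paths : List String), Dom_get_active_container_py path tracked_paths → Spec_get_active_container_py path tracked_paths (get_active_container_py path tracked_paths)

-- ===== LEMMAS AND PROOFS =====

-- "container c matches": c ++ "/" is a prefix of the path's characters
def Good (cs : List Char) (c : String) : Prop := (c.toList ++ ['/']) <+: cs

-- a match is exactly: the path has a '/' right after a copy of c
lemma good_iff (cs : List Char) (c : String) :
    Good cs c ↔ cs[c.toList.length]? = some '/' ∧ cs.take c.toList.length = c.toList := by
  constructor
  · rintro ⟨t, ht⟩
    subst ht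
    simp
  · rintro ⟨h1, h2⟩
    have h3 : cs.take (c.toList.length + 1) = c.toList ++ ['/'] := by
      rw [List.take_add_one, h1, h2]; rfl
    calc c.toList ++ ['/'] = cs.take (c.toList.length + 1) := h3.symm
      _ <+: cs := List.take_prefix _ _

-- invariant of A's fold: it returns a matching container of maximal length, or none
lemma foldA_spec (cs : List Char) (ts : List String) (acc : Option String)
    (hacc : ∀ a, acc = some a → Good cs a) :
    (ts.foldl
      (fun (best : Option String) (container : String) =>
        if PySem.Chars.startswith cs (container.toList ++ ['/']) then
          match best with
          | none => some container
          | some b => if b.toList.length < container.toList.length then some container else some b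
        else best) acc = none → acc = none ∧ ∀ c ∈ ts, ¬ Good cs c) ∧
    (∀ b, ts.foldl
      (fun (best : Option String) (container : String) =>
        if PySem.Chars.startswith cs (container.toList ++ ['/']) then
          match best with
          | none => some container
          | some b => if b.toList.length < container.toList.length then some container else some b
        else best) acc = some b → Good cs b ∧ (b ∈ ts ∨ acc = some b) ∧
      (∀ c ∈ ts, Good cs c → c.toList.length ≤ b.toList.length) ∧
      (∀ a, acc = some a → a.toList.length ≤ b.toList.length)) := by
  induction ts generalizing acc with
  | nil =>
    refine ⟨fun h => ⟨h, by simp⟩, fun b hb => ⟨hacc b hb, Or.inr hb, by simp, fun a ha => ?_⟩⟩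
    simp only [List.foldl_nil] at hb; rw [hb] at ha; cases ha; exact le_rfl
  | cons c ts' ih =>
    by_cases hg : PySem.Chars.startswith cs (c.toList ++ ['/']) = true
    · have hgood : Good cs c := (PySem.Chars.startswith_iff cs (c.toList ++ ['/'])).1 hg
      cases acc with
      | none =>
        have h := ih (some c) (by rintro a ⟨rfl⟩; exact hgood)
        simp only [List.foldl_cons, hg, if_true]
        refine ⟨fun hn => absurd ((h.1 hn).1) (by simp), fun b hb => ?_⟩
        obtain ⟨h1, h2, h3, h4⟩ := h.2 b hb
        refine ⟨h1, ?_, ?_, by simp⟩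
        · rcases h2 with h2 | h2
          · exact Or.inl (List.mem_cons_of_mem _ h2)
          · exact Or.inl (by simp at h2; simp [h2])
        · intro d hd hgd
          rcases List.mem_cons.1 hd with rfl | hd
          · exact h4 d rfl
          · exact h3 d hd hgd
      | some a =>
        have hga : Good cs a := hacc a rfl
        by_cases hl : a.toList.length < c.toList.length
        · have h := ih (some c) (by rintro x ⟨rfl⟩; exact hgood)
          simp only [List.foldl_cons, hg, hl, if_pos]
          refine ⟨fun hn => absurd ((h.1 hn).1) (by simp), fun b hb => ?_⟩
          obtain ⟨h1, h2, h3, h4⟩ := h.2 b hb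
          refine ⟨h1, ?_, ?_, ?_⟩
          · rcases h2 with h2 | h2
            · exact Or.inl (List.mem_cons_of_mem _ h2)
            · exact Or.inl (by simp at h2; simp [h2])
          · intro d hd hgd
            rcases List.mem_cons.1 hd with rfl | hd
            · exact h4 d rfl
            · exact h3 d hd hgd
          · rintro x ⟨rfl⟩
            exact le_of_lt (lt_of_lt_of_le hl (h4 c rfl))
        · have h := ih (some a) hacc
          simp only [List.foldl_cons, hg, if_true, hl]
          refine ⟨fun hn => absurd ((h.1 hn).1) (by simp), fun b hb => ?_⟩
          obtain ⟨h1, h2, h3, h4⟩ := h.2 b hb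
          refine ⟨h1, ?_, ?_, h4⟩
          · rcases h2 with h2 | h2
            · exact Or.inl (List.mem_cons_of_mem _ h2)
            · exact Or.inr h2
          · intro d hd hgd
            rcases List.mem_cons.1 hd with rfl | hd
            · exact le_trans (le_of_not_gt hl) (h4 a rfl)
            · exact h3 d hd hgd
    · have hngood : ¬ Good cs c := fun h => hg ((PySem.Chars.startswith_iff cs _).2 h)
      have h := ih acc hacc
      simp only [List.foldl_cons, hg]
      refine ⟨fun hn => ⟨(h.1 hn).1, ?_⟩, fun b hb => ?_⟩
      · intro d hd
        rcases List.mem_cons.1 hd with rfl | hd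
        · exact hngood
        · exact (h.1 hn).2 d hd
      · obtain ⟨h1, h2, h3, h4⟩ := h.2 b hb
        refine ⟨h1, ?_, ?_, h4⟩
        · rcases h2 with h2 | h2
          · exact Or.inl (List.mem_cons_of_mem _ h2)
          · exact Or.inr h2
        · intro d hd hgd
          rcases List.mem_cons.1 hd with rfl | hd
          · exact absurd hgd hngood
          · exact h3 d hd hgd

-- B's loop returns (none, none) when there is no hit below n
lemma altLoop_none (cs : List Char) (ts : List String) (n : Nat)
    (h : ∀ i < n, ¬ (cs[i]? = some '/' ∧ String.ofList (cs.take i) ∈ ts)) :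
    altLoop cs ts n = (none, none) := by
  induction n with
  | zero => rfl
  | succ i ih =>
    rw [altLoop, if_neg (h i (Nat.lt_succ_self i))]
    exact ih fun j hj => h j (Nat.lt_succ_of_lt hj)

-- B's loop returns the split at i when i is the largest hit below n
lemma altLoop_hit (cs : List Char) (ts : List String) (n i : Nat) (hin : i < n)
    (hi : cs[i]? = some '/' ∧ String.ofList (cs.take i) ∈ ts)
    (hmax : ∀ j, i < j → j < n → ¬ (cs[j]? = some '/' ∧ String.ofList (cs.take j) ∈ ts)) :
    altLoop cs ts n = (some (String.ofList (cs.take i)), some (String.ofList (cs.drop (i+1)))) := by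
  induction n with
  | zero => omega
  | succ m ih =>
    by_cases hm : i = m
    · subst hm; rw [altLoop, if_pos hi]
    · rw [altLoop, if_neg (hmax m (by omega) (Nat.lt_succ_self m))]
      exact ih (by omega) fun j h1 h2 => hmax j h1 (Nat.lt_succ_of_lt h2)

-- a slash hit at index i yields a matching container, of toList length i
lemma good_of_hit (cs : List Char) (i : Nat) (h : cs[i]? = some '/') :
    (String.ofList (cs.take i)).toList.length = i ∧ Good cs (String.ofList (cs.take i)) := by
  have hlen : i < cs.length := by
    rcases List.getElem?_eq_some_iff.1 h with ⟨hl, _⟩; exact hl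
  have ht : (String.ofList (cs.take i)).toList = cs.take i := by simp
  have hL : (String.ofList (cs.take i)).toList.length = i := by
    rw [ht]; simp [Nat.min_eq_left (le_of_lt hlen)]
  refine ⟨hL, (good_iff _ _).2 ?_⟩
  rw [hL, ht]
  exact ⟨h, rfl⟩

-- ===== VERDICT (by name: the statement is the Claim_ definition above) =====
theorem get_active_container_py_spec : Claim_equal_get_active_container_py := by
  intro path ts _
  unfold Spec_get_active_container_py get_active_container_py get_active_container_py_alt
  set cs := path.toList with hcs
  by_cases hts : ts = []
  · subst hts
    rw [if_pos rfl, altLoop_none cs [] cs.length (by simp)]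
  · rw [if_neg hts]
    have h := foldA_spec cs ts none (by simp)
    cases hr : ts.foldl
      (fun (best : Option String) (container : String) =>
        if PySem.Chars.startswith cs (container.toList ++ ['/']) then
          match best with
          | none => some container
          | some b => if b.toList.length < container.toList.length then some container else some b
        else best) none with
    | none =>
      simp only []
      rw [altLoop_none cs ts cs.length]
      intro i _ ⟨h1, h2⟩
      exact (h.1 hr).2 _ h2 (good_of_hit cs i h1).2
    | some b =>
      simp only []
      obtain ⟨hgb, hmem, hmax, -⟩ := h.2 b hr
      rcases hmem with hmem | hmem; swap; · exact absurd hmem (by simp)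
      obtain ⟨hslash, htake⟩ := (good_iff cs b).1 hgb
      have hlen : b.toList.length < cs.length := by
        rcases List.getElem?_eq_some_iff.1 hslash with ⟨hl, _⟩; exact hl
      have hofb : String.ofList (cs.take b.toList.length) = b := by
        rw [htake]; simp
      rw [altLoop_hit cs ts cs.length b.toList.length hlen ⟨hslash, by rw [hofb]; exact hmem⟩]
      · rw [hofb]
        have : PySem.List.slice cs (some ((b.toList.length : Int) + 1)) none
            = cs.drop (b.toList.length + 1) := by
          have := PySem.List.slice_from_natCast cs (b.toList.length + 1)
          push_cast at this ⊢
          exact this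
        rw [this]
      · intro j hj1 hj2 ⟨h1, h2⟩
        obtain ⟨hL, hg⟩ := good_of_hit cs j h1
        have := hmax _ h2 hg
        omega
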